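-- pv_equiv track=rewrite | github.com/xiaden/nomarr | nomarr/services/calibration.py | _parse_tag_key
-- ===== SOURCE A (Python) =====
-- def _parse_tag_key(tag_key: str) -> tuple[str, str, str] | None:
--     """
--     Parse tag key to extract model_name, head_name, and label.
--
--     Tag format: label_framework_embedder{date}_label{date}_calib_version
--     Example: happy_essentia21b6dev1389_yamnet20210604_happy20220825_none_0
--
--     Returns:
--         Tuple of (model_name, head_name, label) or None if parse fails
--     """
--     parts = tag_key.split("_")
--     if len(parts) < 5:
--         return None
--
--     # Extract embedder (backbone) - at index -4
--     embedder_part = parts[-4]  # e.g., "yamnet20210604"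
--
--     # Extract head part - at index -3
--     head_part = parts[-3]  # e.g., "happy20220825"
--
--     # Extract label from head part (everything before the 8-digit date)
--     if len(head_part) < 8 or not head_part[-8:].isdigit():
--         return None
--     head_name = head_part[:-8] if len(head_part) > 8 else parts[0]
--
--     # Extract backbone from embedder part
--     model_name = None
--     for i in range(len(embedder_part) - 7):
--         if embedder_part[i : i + 2] == "20" and embedder_part[i : i + 8].isdigit():
--             model_name = embedder_part[:i]
--             break
--
--     if not model_name:
--         return None
--
--     # Label is the first part of the tag key
--     label = parts[0]
--
--     return (model_name, head_name, label)
-- ===== SOURCE B (Python) =====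
-- def _parse_tag_key(tag_key: str) -> tuple[str, str, str] | None:
--     """Two-stage approach: a backward pass precomputes, for every position, the
--     length of the digit run starting there; date checks then become O(1) array
--     lookups instead of repeated slice-and-isdigit tests."""
--     parts = tag_key.split("_")
--     if len(parts) < 5:
--         return None
--     label = parts[0]
--     embedder_part = parts[-4]
--     head_part = parts[-3]
--
--     def digit_runs(s):
--         # r[i] = length of the maximal run of ASCII-digit chars starting at i
--         r = [0] * (len(s) + 1)
--         for i in range(len(s) - 1, -1, -1):
--             r[i] = r[i + 1] + 1 if s[i].isdigit() else 0
--         return r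
--
--     hr = digit_runs(head_part)
--     if len(head_part) < 8 or hr[len(head_part) - 8] < 8:
--         return None
--     head_name = head_part[:-8] or label
--
--     er = digit_runs(embedder_part)
--     m = next((i for i in range(len(embedder_part))
--               if er[i] >= 8 and embedder_part[i] == '2' and embedder_part[i + 1] == '0'),
--              None)
--     if not m:  # no date found, or the date starts the string (empty model name)
--         return None
--     return (embedder_part[:m], head_name, label)
-- ===== Notes on version B (the rewrite author's own statement) =====
-- stated objective: alternative
-- what changed: Instead of testing 8-char slices with isdigit at each candidate position, B precomputes in one backward pass an array of digit-run lengths per position; the head-date guard and the embedder date search then become O(1) run-length lookups (run >= 8 plus the two literal '20' chars).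
import Mathlib
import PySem

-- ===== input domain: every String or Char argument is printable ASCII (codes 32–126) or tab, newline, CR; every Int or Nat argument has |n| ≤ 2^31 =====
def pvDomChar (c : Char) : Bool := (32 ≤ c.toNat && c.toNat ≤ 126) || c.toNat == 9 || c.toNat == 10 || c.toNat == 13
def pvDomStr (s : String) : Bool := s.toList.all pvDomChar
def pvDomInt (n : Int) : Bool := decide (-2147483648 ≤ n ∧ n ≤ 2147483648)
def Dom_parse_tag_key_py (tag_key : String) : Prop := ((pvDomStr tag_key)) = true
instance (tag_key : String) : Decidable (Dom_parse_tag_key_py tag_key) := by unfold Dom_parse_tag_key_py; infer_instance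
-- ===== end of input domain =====

-- B replaces A's repeated slice-and-isdigit date tests by a backward pass that
-- precomputes digit-run lengths, turning each date check into an O(1) lookup; objective: alternative.

-- ===== PORT A =====
-- A's 'for i in range(len(embedder_part) - 7): … break' loop, as recursion over the index list
def pvAFind (is : List Int) (l : List Char) : Option (List Char) :=
  match is with
  | [] => none
  | i :: rest =>
      if PySem.List.slice l (some i) (some (i + 2)) == ['2', '0'] &&
         PySem.Chars.strIsdigit (PySem.List.slice l (some i) (some (i + 8))) then
        some (PySem.List.slice l none (some i))   -- embedder_part[:i], then break
      else pvAFind rest l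

def parse_tag_key_py (tag_key : String) : Option (String × String × String) :=
  let parts := (PySem.Str.split? tag_key "_").getD []   -- sep "_" ≠ "", so split? is never none
  if parts.length < 5 then none
  else
    let embedder_part := (PySem.List.pyGet? parts (-4)).getD ""   -- in range: parts.length ≥ 5
    let head_part := (PySem.List.pyGet? parts (-3)).getD ""
    let hl := head_part.toList
    if decide (hl.length < 8) || !PySem.Chars.strIsdigit (PySem.List.slice hl (some (-8)) none) then
      none
    else
      let p0 := (PySem.List.pyGet? parts 0).getD ""
      let head_name := if 8 < hl.length then String.ofList (PySem.List.slice hl none (some (-8))) else p0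
      let el := embedder_part.toList
      match pvAFind (PySem.List.pyRange 0 ((el.length : Int) - 7) 1) el with
      | none => none                                    -- model_name is None
      | some m => if m.isEmpty then none                -- 'if not model_name' also rejects ""
                  else some (String.ofList m, head_name, p0)

-- ===== PORT B =====
-- digit_runs: backward pass, r[i] = length of the digit run starting at i (r has length |s|+1)
def pvRuns (s : List Char) : List Nat :=
  match s with
  | [] => [0]
  | c :: t =>
      let r := pvRuns t
      (if PySem.Chars.isdigit c then r.headD 0 + 1 else 0) :: r

-- next((i for i in range(len(s)) if er[i] >= 8 and s[i]=='2' and s[i+1]=='0'), None),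
-- walking the string together with its run array (er[i] ≥ 8 guarantees s[i+1] exists)
def pvFindCut (l : List Char) (rs : List Nat) (i : Nat) : Option Nat :=
  match l, rs with
  | [], _ => none
  | _ :: _, [] => none     -- unreachable: the run array is one longer than the string
  | c :: t, r :: rs' =>
      if decide (8 ≤ r) && (c == '2') && (t.headD ' ' == '0') then some i
      else pvFindCut t rs' (i + 1)

def parse_tag_key_py_alt (tag_key : String) : Option (String × String × String) :=
  let parts := (PySem.Str.split? tag_key "_").getD []   -- sep "_" ≠ "", so split? is never none
  if parts.length < 5 then none
  else
    let label := (PySem.List.pyGet? parts 0).getD ""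
    let embedder_part := (PySem.List.pyGet? parts (-4)).getD ""
    let head_part := (PySem.List.pyGet? parts (-3)).getD ""
    let hl := head_part.toList
    let hr := pvRuns hl
    if decide (hl.length < 8) || decide (hr.getD (hl.length - 8) 0 < 8) then none
    else
      let hn := PySem.List.slice hl none (some (-8))
      let head_name := if hn.isEmpty then label else String.ofList hn   -- head_part[:-8] or label
      let el := embedder_part.toList
      match pvFindCut el (pvRuns el) 0 with
      | none => none                                    -- not m: no date
      | some 0 => none                                  -- not m: date at position 0
      | some i => some (String.ofList (el.take i), head_name, label)

-- ===== PRECONDITION & SPEC =====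
def Spec_parse_tag_key_py (tag_key : String) (out : Option (String × String × String)) : Prop := out = parse_tag_key_py_alt tag_key
instance (tag_key : String) (out : Option (String × String × String)) : Decidable (Spec_parse_tag_key_py tag_key out) := by unfold Spec_parse_tag_key_py; infer_instance

-- ===== CLAIM (what is proved, stated in full; the proofs are below) =====
def Claim_equal_parse_tag_key_py : Prop := ∀ (tag_key : String), Dom_parse_tag_key_py tag_key → Spec_parse_tag_key_py tag_key (parse_tag_key_py tag_key)

-- ===== LEMMAS AND PROOFS =====

-- does the pattern 20[0-9]{6} match at the head of this suffix? (proof-side bridge predicate)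
def pvDateAt : List Char → Bool
  | c0 :: c1 :: c2 :: c3 :: c4 :: c5 :: c6 :: c7 :: _ =>
      c0 == '2' && c1 == '0' && [c2, c3, c4, c5, c6, c7].all PySem.Chars.isdigit
  | _ => false

-- start index of the leftmost pvDateAt match (proof-side bridge between the two searches)
def pvSearchDate (i : Nat) (l : List Char) : Option Nat :=
  match l with
  | [] => none
  | c :: t => if pvDateAt (c :: t) then some i else pvSearchDate (i + 1) t

-- pvDateAt, characterized by A's slice conditions on the suffix
theorem pvDateAt_char (m : List Char) :
    pvDateAt m = ((m.take 2 == ['2', '0']) && PySem.Chars.strIsdigit (m.take 8) && decide (8 ≤ m.length)) := by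
  match m with
  | [] | [_] | [_, _] | [_, _, _] | [_, _, _, _] | [_, _, _, _, _] | [_, _, _, _, _, _]
  | [_, _, _, _, _, _, _] =>
      simp [pvDateAt]
  | c0 :: c1 :: c2 :: c3 :: c4 :: c5 :: c6 :: c7 :: rest =>
      simp only [pvDateAt, List.take_succ_cons, List.take_zero, PySem.Chars.strIsdigit]
      have hbeq : ∀ (a b : Char), (a == b) = decide (a = b) := fun a b => rfl
      by_cases h0 : c0 = '2' <;> by_cases h1 : c1 = '0' <;>
        simp [hbeq, h0, h1, PySem.Chars.isdigit]

theorem pvAFind_eq (is : List Int) (l : List Char) :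
    pvAFind is l =
      (is.find? (fun i => PySem.List.slice l (some i) (some (i + 2)) == ['2', '0'] &&
          PySem.Chars.strIsdigit (PySem.List.slice l (some i) (some (i + 8))))).map
        (fun i => PySem.List.slice l none (some i)) := by
  induction is with
  | nil => rfl
  | cons i rest ih =>
      cases h : (PySem.List.slice l (some i) (some (i + 2)) == ['2', '0'] &&
          PySem.Chars.strIsdigit (PySem.List.slice l (some i) (some (i + 8)))) with
      | true => simp [pvAFind, List.find?, h]
      | false => simp [pvAFind, List.find?, h, ih]

theorem pvSearchDate_eq (l : List Char) (k : Nat) :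
    pvSearchDate k l = (List.find? (fun i => pvDateAt (l.drop i)) (List.range l.length)).map (· + k) := by
  induction l generalizing k with
  | nil => rfl
  | cons c t ih =>
      simp only [pvSearchDate]
      rw [List.length_cons, List.range_succ_eq_map, List.find?]
      by_cases h : pvDateAt (c :: t) = true
      · simp [h]
      · simp only [List.drop_zero] at *
        simp only [h, Bool.false_eq_true, if_false, List.find?_map]
        rw [ih (k + 1)]
        simp [Option.map_map, Function.comp_def, Nat.add_assoc, Nat.add_comm 1 k]

theorem find?_congr_mem {α : Type} (p q : α → Bool) (l : List α) (h : ∀ x ∈ l, p x = q x) :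
    l.find? p = l.find? q := by
  induction l with
  | nil => rfl
  | cons a t ih =>
      simp only [List.find?]
      rw [h a (by simp)]
      split
      · rfl
      · exact ih (fun x hx => h x (by simp [hx]))

theorem pvDateAt_short (m : List Char) (h : m.length < 8) : pvDateAt m = false := by
  rw [pvDateAt_char]
  simp [Nat.not_le.mpr h]

theorem date_master (l : List Char) :
    pvAFind (PySem.List.pyRange 0 ((l.length : Int) - 7) 1) l =
      (pvSearchDate 0 l).map (fun i => l.take i) := by
  rw [pvSearchDate_eq]
  by_cases h7 : l.length ≤ 7
  · have h1 : PySem.List.pyRange 0 ((l.length : Int) - 7) 1 = [] := by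
      have : (l.length : Int) - 7 ≤ 0 := by omega
      simp [PySem.List.pyRange]
      omega
    have h2 : List.find? (fun i => pvDateAt (l.drop i)) (List.range l.length) = none := by
      rw [List.find?_eq_none]
      intro i _
      have hlt : (l.drop i).length < 8 := by
        simp only [List.length_drop]
        omega
      simp [pvDateAt_short (l.drop i) hlt]
    rw [h1, h2]
    rfl
  · rw [Nat.not_le] at h7
    have hsplit : (l.length : Int) - 7 = ((l.length - 7 : Nat) : Int) := by omega
    rw [hsplit, PySem.List.pyRange_zero_natCast, pvAFind_eq, List.find?_map]
    have hr : List.range l.length = List.range (l.length - 7) ++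
        (List.range 7).map (fun x => (l.length - 7) + x) := by
      rw [← List.range_add]
      congr 1
      omega
    have h2 : List.find? (fun i => pvDateAt (l.drop i))
        ((List.range 7).map (fun x => (l.length - 7) + x)) = none := by
      rw [List.find?_eq_none]
      intro i hi
      simp only [List.mem_map, List.mem_range] at hi
      obtain ⟨j, hj, rfl⟩ := hi
      have hlt : (l.drop (l.length - 7 + j)).length < 8 := by
        simp only [List.length_drop]
        omega
      simp [pvDateAt_short _ hlt]
    have hcong : List.find? ((fun i : Int => PySem.List.slice l (some i) (some (i + 2)) == ['2', '0'] &&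
            PySem.Chars.strIsdigit (PySem.List.slice l (some i) (some (i + 8)))) ∘ (fun k : Nat => (k : Int)))
          (List.range (l.length - 7))
        = List.find? (fun i => pvDateAt (l.drop i)) (List.range (l.length - 7)) := by
      apply find?_congr_mem
      intro i hi
      simp only [List.mem_range] at hi
      simp only [Function.comp]
      have e2 : ((i : Int) + 2) = ((i : Int) + ((2 : Nat) : Int)) := by norm_num
      have e8 : ((i : Int) + 8) = ((i : Int) + ((8 : Nat) : Int)) := by norm_num
      rw [e2, e8, PySem.List.slice_natCast_add, PySem.List.slice_natCast_add, pvDateAt_char]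
      have h8 : 8 ≤ l.length - i := by omega
      simp [h8]
    rw [hr, List.find?_append, h2, hcong]
    cases hf : List.find? (fun i => pvDateAt (l.drop i)) (List.range (l.length - 7)) with
    | none => rfl
    | some i => simp [PySem.List.slice_to_natCast]

-- n ≤ length of the digit-prefix  ⟺  the first n chars are digits and there are n of them
theorem takeWhile_len_ge (p : Char → Bool) (n : Nat) (l : List Char) :
    decide (n ≤ (l.takeWhile p).length) = ((l.take n).all p && decide (n ≤ l.length)) := by
  induction n generalizing l with
  | zero => simp
  | succ m ih =>
      cases l with
      | nil => simp
      | cons c t =>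
          cases hc : p c with
          | true => simp [List.takeWhile, hc, ih t]
          | false => simp [List.takeWhile, hc]

theorem pvRuns_headD (l : List Char) :
    (pvRuns l).headD 0 = (l.takeWhile PySem.Chars.isdigit).length := by
  induction l with
  | nil => rfl
  | cons c t ih =>
      cases hc : PySem.Chars.isdigit c with
      | true =>
          simp only [pvRuns, hc, if_true, List.headD_cons]
          rw [ih]
          simp [List.takeWhile, hc]
      | false => simp [pvRuns, List.takeWhile, hc]

theorem pvRuns_getD (l : List Char) (i : Nat) :
    (pvRuns l).getD i 0 = ((l.drop i).takeWhile PySem.Chars.isdigit).length := by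
  induction l generalizing i with
  | nil => cases i <;> simp [pvRuns]
  | cons c t ih =>
      cases i with
      | zero =>
          show (pvRuns (c :: t)).headD 0 = _
          rw [pvRuns_headD]
          simp
      | succ j =>
          simp only [pvRuns, List.getD_cons_succ, List.drop_succ_cons]
          exact ih j

-- B's O(1) run-array test at a position equals A's slice-based date test there
theorem cond_eq (c : Char) (t : List Char) :
    (decide (8 ≤ (if PySem.Chars.isdigit c then (pvRuns t).headD 0 + 1 else 0)) &&
       (c == '2') && (t.headD ' ' == '0')) = pvDateAt (c :: t) := by
  have hrw : (if PySem.Chars.isdigit c then (pvRuns t).headD 0 + 1 else 0)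
      = ((c :: t).takeWhile PySem.Chars.isdigit).length := by
    rw [pvRuns_headD]
    cases hc : PySem.Chars.isdigit c <;> simp [List.takeWhile, hc]
  rw [hrw, takeWhile_len_ge, pvDateAt_char]
  by_cases h8 : 8 ≤ (c :: t).length
  · cases t with
    | nil => simp at h8
    | cons d t' =>
        have hne : ((c :: d :: t').take 8) ≠ [] := by
          simp [List.take]
        have hbeq : ∀ (a b : Char), (a == b) = decide (a = b) := fun a b => rfl
        simp only [List.headD_cons, List.take_succ_cons, PySem.Chars.strIsdigit,
          List.isEmpty_iff, hne, decide_false, Bool.not_false, Bool.true_and, h8, decide_true,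
          Bool.and_true]
        by_cases hc : c = '2' <;> by_cases hd : d = '0' <;>
          cases ha : ((c :: d :: t').take 8).all PySem.Chars.isdigit <;>
            simp_all [List.take_succ_cons]
  · have h7 : ¬ 7 ≤ t.length := by simp only [List.length_cons] at h8; omega
    simp [h8, h7]

theorem pvFindCut_eq (l : List Char) (k : Nat) :
    pvFindCut l (pvRuns l) k = pvSearchDate k l := by
  induction l generalizing k with
  | nil => rfl
  | cons c t ih =>
      show pvFindCut (c :: t) ((if PySem.Chars.isdigit c then (pvRuns t).headD 0 + 1 else 0) :: pvRuns t) k = _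
      simp only [pvFindCut, pvSearchDate, cond_eq]
      split
      · rfl
      · exact ih (k + 1)

-- B's run-array guard on head_part equals A's length+isdigit guard
theorem guard_eq (hl : List Char) :
    (decide (hl.length < 8) || !PySem.Chars.strIsdigit (PySem.List.slice hl (some (-8)) none))
      = (decide (hl.length < 8) || decide ((pvRuns hl).getD (hl.length - 8) 0 < 8)) := by
  by_cases h : hl.length < 8
  · simp [h]
  · rw [PySem.List.slice_from_neg_ofNat hl 8 (by omega), pvRuns_getD]
    have hlen : (hl.drop (hl.length - 8)).length = 8 := by simp; omega
    have hne : (hl.drop (hl.length - 8)).isEmpty = false := by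
      rw [Bool.eq_false_iff]
      intro he
      rw [List.isEmpty_iff] at he
      rw [he] at hlen
      simp at hlen
    have h2 : decide (((hl.drop (hl.length - 8)).takeWhile PySem.Chars.isdigit).length < 8)
        = !decide (8 ≤ ((hl.drop (hl.length - 8)).takeWhile PySem.Chars.isdigit).length) := by
      by_cases hx : ((hl.drop (hl.length - 8)).takeWhile PySem.Chars.isdigit).length < 8 <;>
        simp [hx] <;> omega
    rw [h2, takeWhile_len_ge]
    have ht : (hl.drop (hl.length - 8)).take 8 = hl.drop (hl.length - 8) := by
      apply List.take_of_length_le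
      omega
    simp [h, PySem.Chars.strIsdigit, hne, ht, hlen]

theorem len8_of_guard (hl : List Char)
    (h : (decide (hl.length < 8) || decide ((pvRuns hl).getD (hl.length - 8) 0 < 8)) = false) :
    8 ≤ hl.length := by
  simp only [Bool.or_eq_false_iff, decide_eq_false_iff_not] at h
  omega

theorem headname_eq (hl : List Char) (p0 : String) (h8 : 8 ≤ hl.length) :
    (if 8 < hl.length then String.ofList (PySem.List.slice hl none (some (-8))) else p0)
      = (if (PySem.List.slice hl none (some (-8))).isEmpty then p0
         else String.ofList (PySem.List.slice hl none (some (-8)))) := by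
  rw [PySem.List.slice_to_neg_ofNat hl 8 (by omega)]
  by_cases h : 8 < hl.length
  · have hlen : (hl.take (hl.length - 8)).length = hl.length - 8 := by
      rw [List.length_take]
      omega
    have hne : (hl.take (hl.length - 8)).isEmpty = false := by
      rw [Bool.eq_false_iff]
      intro he
      rw [List.isEmpty_iff] at he
      rw [he] at hlen
      simp at hlen
      omega
    simp [h, hne]
  · have h0 : hl.length - 8 = 0 := by omega
    simp [h, h0]

theorem tailmatch_eq (el : List Char) (hn p0 : String) :
    (match pvAFind (PySem.List.pyRange 0 ((el.length : Int) - 7) 1) el with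
     | none => none
     | some m => if m.isEmpty then none else some (String.ofList m, hn, p0))
      = (match pvFindCut el (pvRuns el) 0 with
         | none => none
         | some 0 => none
         | some i => some (String.ofList (el.take i), hn, p0)) := by
  rw [date_master, pvFindCut_eq]
  cases hf : pvSearchDate 0 el with
  | none => rfl
  | some i =>
    cases i with
    | zero => simp
    | succ j =>
      have hi : j + 1 ∈ List.range el.length := by
        rw [pvSearchDate_eq] at hf
        simp only [Option.map_eq_some_iff] at hf
        obtain ⟨a, ha, rfl⟩ := hf
        simpa using List.mem_of_find?_eq_some ha
      simp only [List.mem_range] at hi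
      cases el with
      | nil => simp at hi
      | cons a t => simp

-- ===== VERDICT (by name: the statement is the Claim_ definition above) =====
theorem parse_tag_key_py_spec : Claim_equal_parse_tag_key_py := by
  intro tag_key _
  unfold Spec_parse_tag_key_py
  simp only [parse_tag_key_py, parse_tag_key_py_alt]
  generalize (PySem.Str.split? tag_key "_").getD [] = parts
  by_cases h5 : parts.length < 5
  · simp [h5]
  · simp only [h5, if_false]
    generalize ((PySem.List.pyGet? parts (-3)).getD "").toList = hl
    generalize ((PySem.List.pyGet? parts (-4)).getD "").toList = el
    generalize (PySem.List.pyGet? parts 0).getD "" = p0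
    rw [guard_eq]
    cases hg : (decide (hl.length < 8) || decide ((pvRuns hl).getD (hl.length - 8) 0 < 8)) with
    | true => simp
    | false =>
        simp only [Bool.false_eq_true, if_false]
        rw [headname_eq hl p0 (len8_of_guard hl hg)]
        exact tailmatch_eq el _ p0
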